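-- pv_equiv track=rewrite | github.com/wr1/cfold | src/cfold/utils/instructions.py | collect_patterns
-- ===== SOURCE A (Python) =====
-- from typing import List, Dict, Optional
--
-- def collect_patterns(
--     config: Dict, dialect: str, processed: set = None, path: set = None
-- ) -> Dict[str, List[str]]:
--     """Recursively collect patterns for the dialect, handling 'pre' dependencies."""
--     if processed is None:
--         processed = set()
--     if path is None:
--         path = set()
--
--     if dialect in processed:
--         return {}
--     if dialect in path:
--         raise ValueError(f"Cycle detected in 'pre' for patterns in '{dialect}'")
--
--     path.add(dialect)
--     instr = config.get(dialect, {})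
--
--     patterns = {
--         "included_suffix": [],
--         "excluded": [],
--         "included_dirs": [],
--         "exclude": [],
--     }
--
--     for pre_d in instr.get("pre", []):
--         pre_patterns = collect_patterns(config, pre_d, processed, path)
--         for key in patterns:
--             patterns[key].extend(pre_patterns.get(key, []))
--
--     for key in patterns:
--         patterns[key].extend(instr.get(key, []))
--
--     path.remove(dialect)
--     processed.add(dialect)
--     return patterns
-- ===== SOURCE B (Python) =====
-- from typing import List, Dict, Optional
--
-- KEYS = ["included_suffix", "excluded", "included_dirs", "exclude"]
--
--
-- def collect_patterns(
--     config: Dict, dialect: str, processed: set = None, path: set = None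
-- ) -> Dict[str, List[str]]:
--     """Iteratively collect patterns for the dialect: explicit-stack DFS builds a
--     post-order list first, then one flat pass aggregates the four pattern keys."""
--     if processed is None:
--         processed = set()
--     if path is None:
--         path = set()
--
--     if dialect in processed:
--         return {}
--
--     order = []
--     stack = [(False, dialect)]  # (is_exit, name); top of stack at the end
--     while stack:
--         is_exit, d = stack.pop()
--         if is_exit:
--             order.append(d)
--             path.remove(d)
--             processed.add(d)
--             continue
--         if d in processed:
--             continue
--         if d in path:
--             raise ValueError(f"Cycle detected in 'pre' for patterns in '{d}'")
--         path.add(d)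
--         stack.append((True, d))
--         for pre_d in reversed(config.get(d, {}).get("pre", [])):
--             stack.append((False, pre_d))
--
--     return {
--         key: [p for n in order for p in config.get(n, {}).get(key, [])]
--         for key in KEYS
--     }
-- ===== Notes on version B (the rewrite author's own statement) =====
-- stated objective: alternative
-- what changed: Replaces the recursive DFS that merges four pattern lists at every level with an explicit-stack iterative DFS (enter/exit markers) that first builds the post-order list of newly processed dialects and then aggregates each of the four keys in one flat pass over that list.
import Mathlib
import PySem

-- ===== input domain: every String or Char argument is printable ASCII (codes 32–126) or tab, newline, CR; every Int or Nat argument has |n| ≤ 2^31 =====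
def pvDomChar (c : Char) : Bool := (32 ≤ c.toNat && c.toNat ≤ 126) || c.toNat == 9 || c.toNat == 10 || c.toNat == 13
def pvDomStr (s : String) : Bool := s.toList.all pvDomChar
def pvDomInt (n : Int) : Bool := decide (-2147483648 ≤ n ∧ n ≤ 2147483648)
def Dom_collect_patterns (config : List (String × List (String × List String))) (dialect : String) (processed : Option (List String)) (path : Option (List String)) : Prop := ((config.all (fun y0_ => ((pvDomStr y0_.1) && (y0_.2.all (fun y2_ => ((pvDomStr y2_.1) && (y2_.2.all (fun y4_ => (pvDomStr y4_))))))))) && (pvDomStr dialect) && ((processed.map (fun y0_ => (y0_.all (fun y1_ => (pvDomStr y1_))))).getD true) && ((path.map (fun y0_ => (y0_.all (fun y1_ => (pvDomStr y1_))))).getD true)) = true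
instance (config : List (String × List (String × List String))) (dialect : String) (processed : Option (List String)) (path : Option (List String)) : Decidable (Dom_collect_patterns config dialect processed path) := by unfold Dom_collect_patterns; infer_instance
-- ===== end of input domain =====

-- B re-implements A's recursive 'pre'-dependency walk as an explicit-stack DFS that first
-- builds a post-order list and then aggregates the four pattern keys in one flat pass;
-- the theorems are about the RETURN value only (both Pythons perform the same net
-- mutations of the caller's `processed`/`path` sets).

-- shared lookup helpers: Python 'config.get(d, {})' / 'instr.get(key, [])' on a dict that
-- arrived as an association list (duplicate keys: Python's dict keeps the LAST value, as Dict.ofList does)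
def pvDGet (config : List (String × List (String × List String))) (d : String) : List (String × List String) :=
  (PySem.Dict.ofList config).getD d []
def pvGetD (instr : List (String × List String)) (k : String) : List String :=
  (PySem.Dict.ofList instr).getD k []
def pvKeys4 : List String := ["included_suffix", "excluded", "included_dirs", "exclude"]

-- ===== PORT A =====
-- literal port of A's recursion; the `for pre_d in …` loop is the mutually recursive goA.
-- Raising (ValueError on cycle) is `none`; fuel (config.length + 2) is proved sufficient on Pre_
-- (recursion depth is bounded by the number of distinct config keys + 1).
mutual
def collectA (config : List (String × List (String × List String))) :
    Nat → String → List String → List String →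
    Option ((List (String × List String)) × List String × List String)
  | 0, _, _, _ => none
  | fa+1, d, pr, pa =>
    if d ∈ pr then some ([], pr, pa)
    else if d ∈ pa then none    -- raise ValueError(f"Cycle detected …")
    else
      match goA config fa (pvGetD (pvDGet config d) "pre") pr (PySem.Set.add pa d)
              (pvKeys4.map (fun k => (k, ([] : List String)))) with
      | none => none
      | some (pats1, pr1, pa2) =>
        some (pats1.map (fun kv => (kv.1, kv.2 ++ pvGetD (pvDGet config d) kv.1)),
              PySem.Set.add pr1 d, pa2.erase d)   -- path.remove(d): d is always present here
  termination_by fa _ _ _ => (fa, 0)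

def goA (config : List (String × List (String × List String))) :
    Nat → List String → List String → List String → List (String × List String) →
    Option ((List (String × List String)) × List String × List String)
  | _, [], pr, pa, pats => some (pats, pr, pa)
  | fa, pre_d :: rest, pr, pa, pats =>
    match collectA config fa pre_d pr pa with
    | none => none
    | some (prePat, pr', pa') =>
      goA config fa rest pr' pa' (pats.map (fun kv => (kv.1, kv.2 ++ pvGetD prePat kv.1)))
  termination_by fa deps _ _ _ => (fa, deps.length + 1)
end


def collect_patterns (config : List (String × List (String × List String))) (dialect : String) (processed : Option (List String)) (path : Option (List String)) : List (String × List String) :=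
  match collectA config (config.length + 2) dialect (processed.getD []) (path.getD []) with
  | none => []                 -- A raises here (cycle); outside Pre_
  | some (pats, _, _) => pats

-- ===== PORT B =====
-- Source B's final dict comprehension over KEYS:
def pvMk (config : List (String × List (String × List String))) (order : List String) : List (String × List String) :=
  pvKeys4.map (fun k => (k, order.flatMap (fun n => pvGetD (pvDGet config n) k)))

-- fuel for the loop, proved sufficient on Pre_ (the loop stops on an empty stack long before)
def pvP (config : List (String × List (String × List String))) : Nat :=
  (((PySem.Dict.ofList config).items.map (fun p => (pvGetD p.2 "pre").length)).sum)
def pvFuelB (config : List (String × List (String × List String))) : Nat :=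
  (pvP config + 3) ^ (config.length + 2)

-- Source B's while-loop: Python's end-of-list stack is modelled top-at-head, so
-- 'append((True,d)); append reversed deps' becomes 'deps.map (false,·) ++ (true,d) :: rest'
def loopB (config : List (String × List (String × List String))) :
    Nat → List (Bool × String) → List String → List String → List String →
    Option (List String × List String)
  | _, [], pr, _, post => some (post, pr)
  | 0, _ :: _, _, _, _ => none
  | fb+1, (true, d) :: rest, pr, pa, post =>
      loopB config fb rest (PySem.Set.add pr d) (pa.erase d) (post ++ [d])
  | fb+1, (false, d) :: rest, pr, pa, post =>
      if d ∈ pr then loopB config fb rest pr pa post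
      else if d ∈ pa then none    -- raise ValueError(f"Cycle detected …")
      else loopB config fb
        (((pvGetD (pvDGet config d) "pre").map (fun x => (false, x))) ++ (true, d) :: rest)
        pr (PySem.Set.add pa d) post

def collect_patterns_alt (config : List (String × List (String × List String))) (dialect : String) (processed : Option (List String)) (path : Option (List String)) : List (String × List String) :=
  let pr0 := processed.getD []
  let pa0 := path.getD []
  if dialect ∈ pr0 then []
  else
    match loopB config (pvFuelB config) [(false, dialect)] pr0 pa0 [] with
    | none => []                 -- B raises here (cycle); outside Pre_
    | some (order, _) => pvMk config order

-- ===== PRECONDITION & SPEC =====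
-- the 'pre' list of a dialect
def pvPre (config : List (String × List (String × List String))) (d : String) : List String :=
  pvGetD (pvDGet config d) "pre"
-- one step of the dependency relation in the subgraph whose edges leave only dialects
-- NOT in the caller's initial `processed` set prc (A never follows edges out of processed dialects)
def pvStepR (config : List (String × List (String × List String))) (prc : List String) (s : List String) : List String :=
  s ++ s.flatMap (fun d => if d ∈ prc then [] else pvPre config d)
def pvReachR (config : List (String × List (String × List String))) (prc : List String) (root : String) : List String :=
  (pvStepR config prc)^[config.length + 1] [root]
-- Pre_ excludes exactly the inputs on which A raises ValueError: those where, following 'pre'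
-- edges from `dialect` through dialects not in the initial `processed` set, one reaches a member
-- of the initial `path` or a 'pre' cycle; on every other input A returns normally.
def Pre_collect_patterns (config : List (String × List (String × List String))) (dialect : String) (processed : Option (List String)) (path : Option (List String)) : Prop :=
  dialect ∈ processed.getD [] ∨
  ((∀ x ∈ path.getD [], x ∈ processed.getD [] ∨ x ∉ pvReachR config (processed.getD []) dialect) ∧
   (∀ p ∈ (PySem.Dict.ofList config).items, p.1 ∉ processed.getD [] →
      p.1 ∈ pvReachR config (processed.getD []) dialect →
      p.1 ∉ (pvStepR config (processed.getD []))^[config.length + 1] (pvGetD p.2 "pre")))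
instance (config : List (String × List (String × List String))) (dialect : String) (processed : Option (List String)) (path : Option (List String)) : Decidable (Pre_collect_patterns config dialect processed path) := by unfold Pre_collect_patterns; infer_instance

def pvWitness_collect_patterns : (List (String × List (String × List String))) × String × Option (List String) × Option (List String) :=
  ([("a", [("pre", ["b"])]), ("b", [("excluded", ["x"])])], "a", none, none)

def Spec_collect_patterns (config : List (String × List (String × List String))) (dialect : String) (processed : Option (List String)) (path : Option (List String)) (out : List (String × List String)) : Prop := out = collect_patterns_alt config dialect processed path
instance (config : List (String × List (String × List String))) (dialect : String) (processed : Option (List String)) (path : Option (List String)) (out : List (String × List String)) : Decidable (Spec_collect_patterns config dialect processed path out) := by unfold Spec_collect_patterns; infer_instance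

-- ===== CLAIM (what is proved, stated in full; the proofs are below) =====
def Claim_equal_collect_patterns : Prop := ∀ (config : List (String × List (String × List String))) (dialect : String) (processed : Option (List String)) (path : Option (List String)), Dom_collect_patterns config dialect processed path → Pre_collect_patterns config dialect processed path → Spec_collect_patterns config dialect processed path (collect_patterns config dialect processed path)

-- ===== LEMMAS AND PROOFS =====

-- the four extension steps of A's dict, computed on pvMk form
theorem pvExtNil (config : List (String × List (String × List String))) (a : List String) :
    (pvMk config a).map (fun kv => (kv.1, kv.2 ++ pvGetD [] kv.1)) = pvMk config a := by
  have h : ∀ k, pvGetD ([] : List (String × List String)) k = [] := fun _ => rfl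
  simp [pvMk, h]

theorem pvExtMk (config : List (String × List (String × List String))) (a b : List String) :
    (pvMk config a).map (fun kv => (kv.1, kv.2 ++ pvGetD (pvMk config b) kv.1)) = pvMk config (a ++ b) := by
  simp only [pvMk, pvKeys4, List.flatMap_append, List.map_cons, List.map_nil]
  rfl

theorem pvExtOwn (config : List (String × List (String × List String))) (a : List String) (d : String) :
    (pvMk config a).map (fun kv => (kv.1, kv.2 ++ pvGetD (pvDGet config d) kv.1)) = pvMk config (a ++ [d]) := by
  simp only [pvMk, pvKeys4, List.flatMap_append, List.flatMap_cons, List.flatMap_nil,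
    List.append_nil, List.map_cons, List.map_nil]

theorem pvSetAdd {s : List String} {x : String} (h : x ∉ s) : PySem.Set.add s x = s ++ [x] := by
  simp [PySem.Set.add, PySem.Set.contains, h]

theorem pvEraseApp {s : List String} {x : String} (h : x ∉ s) : (s ++ [x]).erase x = s := by
  rw [List.erase_append_right _ (by simpa using h)]
  simp

theorem pvPre_cases (config : List (String × List (String × List String))) (d : String) :
    pvPre config d = [] ∨
    ∃ v, (d, v) ∈ (PySem.Dict.ofList config).items ∧ pvPre config d = pvGetD v "pre" := by
  unfold pvPre pvDGet
  cases h : (PySem.Dict.ofList config).get? d with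
  | none =>
    left
    rw [PySem.Dict.getD_eq_get?_getD, h]
    rfl
  | some v =>
    right
    refine ⟨v, PySem.Dict.mem_items_of_get?_eq_some _ h, ?_⟩
    rw [PySem.Dict.getD_eq_get?_getD, h]
    rfl

theorem pvPreLen_le (config : List (String × List (String × List String))) (d : String) :
    (pvPre config d).length ≤ pvP config := by
  rcases pvPre_cases config d with h0 | ⟨v, hm, he⟩
  · simp [h0]
  · rw [he]
    exact List.single_le_sum (fun x _ => Nat.zero_le x) _
      (List.mem_map.2 ⟨(d, v), hm, rfl⟩)

theorem pvOneLeC (P fa : Nat) : 1 ≤ (P + 3) ^ fa := Nat.one_le_pow _ _ (by omega)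

theorem pvMainA (config : List (String × List (String × List String))) :
    ∀ (fa : Nat) (d : String) (pr pa : List String) out,
      collectA config fa d pr pa = some out →
      ∃ δ c,
        out.1 = (if d ∈ pr then [] else pvMk config δ) ∧
        out.2.1 = pr ++ δ ∧ out.2.2 = pa ∧
        (d ∈ pr → δ = []) ∧
        (∀ x ∈ δ, x ∉ pa) ∧
        c + 1 ≤ (pvP config + 3) ^ fa ∧
        (∀ rest post k, loopB config (c + k) ((false, d) :: rest) pr pa post
            = loopB config k rest (pr ++ δ) pa (post ++ δ)) := by
  intro fa
  induction fa with
  | zero => intro d pr pa out h; rw [collectA] at h; cases h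
  | succ fa ih =>
    have hgo : ∀ (deps : List String) (pr pa δacc : List String) out,
        goA config fa deps pr pa (pvMk config δacc) = some out →
        ∃ δ c,
          out.1 = pvMk config (δacc ++ δ) ∧ out.2.1 = pr ++ δ ∧ out.2.2 = pa ∧
          (∀ x ∈ δ, x ∉ pa) ∧
          c ≤ deps.length * (pvP config + 3) ^ fa ∧
          (∀ rest post k, loopB config (c + k) (deps.map (fun x => (false, x)) ++ rest) pr pa post
              = loopB config k rest (pr ++ δ) pa (post ++ δ)) := by
      intro deps
      induction deps with
      | nil =>
        intro pr pa δacc out h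
        rw [goA] at h
        cases h
        exact ⟨[], 0, by simp, by simp, rfl, by simp, by simp, fun rest post k => by simp⟩
      | cons pre_d deps ihd =>
        intro pr pa δacc out h
        rw [goA] at h
        cases hc : collectA config fa pre_d pr pa with
        | none => rw [hc] at h; cases h
        | some trip =>
          obtain ⟨prePat, pr1, pa1⟩ := trip
          rw [hc] at h
          dsimp only at h
          obtain ⟨δ1, c1, h1, h21, h22, hskip, hdisj1, hcost1, hsim1⟩ := ih pre_d pr pa _ hc
          dsimp only at h1 h21 h22 hskip hdisj1
          subst h21 h22
          have hext : (pvMk config δacc).map (fun kv => (kv.1, kv.2 ++ pvGetD prePat kv.1))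
              = pvMk config (δacc ++ δ1) := by
            by_cases hmem : pre_d ∈ pr
            · rw [hskip hmem] at *
              rw [if_pos hmem] at h1
              rw [h1, pvExtNil]
              simp
            · rw [if_neg hmem] at h1
              rw [h1, pvExtMk]
          rw [hext] at h
          obtain ⟨δ2, c2, g1, g21, g22, gdisj, gcost, gsim⟩ := ihd _ _ _ _ h
          refine ⟨δ1 ++ δ2, c1 + c2, ?_, ?_, ?_, ?_, ?_, ?_⟩
          · rw [g1, List.append_assoc]
          · rw [g21, List.append_assoc]
          · exact g22
          · intro x hx
            rcases List.mem_append.1 hx with hx | hx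
            · exact hdisj1 x hx
            · exact gdisj x hx
          · have h1' : c1 ≤ (pvP config + 3) ^ fa := Nat.le_of_succ_le hcost1
            calc c1 + c2 ≤ (pvP config + 3) ^ fa + deps.length * (pvP config + 3) ^ fa :=
                  Nat.add_le_add h1' gcost
              _ = (deps.length + 1) * (pvP config + 3) ^ fa := by ring
              _ = (pre_d :: deps).length * (pvP config + 3) ^ fa := by simp
          · intro rest post k
            have e1 : c1 + c2 + k = c1 + (c2 + k) := by omega
            rw [e1]
            have := hsim1 (deps.map (fun x => (false, x)) ++ rest) post (c2 + k)
            simp only [List.map_cons, List.cons_append] at *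
            rw [this, gsim rest (post ++ δ1) k, List.append_assoc, List.append_assoc]
    intro d pr pa out h
    rw [collectA] at h
    by_cases hpr : d ∈ pr
    · rw [if_pos hpr] at h
      cases h
      refine ⟨[], 1, by simp [hpr], by simp, rfl, fun _ => rfl, by simp, ?_, ?_⟩
      · have hC := pvOneLeC (pvP config) fa
        calc 1 + 1 ≤ 1 * (pvP config + 3) := by omega
          _ ≤ (pvP config + 3) ^ fa * (pvP config + 3) :=
              Nat.mul_le_mul_right _ hC
          _ = (pvP config + 3) ^ (fa + 1) := (pow_succ _ _).symm
      · intro rest post k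
        have e1 : 1 + k = k + 1 := by omega
        rw [e1, loopB, if_pos hpr]
        simp
    · rw [if_neg hpr] at h
      by_cases hpa : d ∈ pa
      · rw [if_pos hpa] at h; cases h
      · rw [if_neg hpa] at h
        have hinit : (pvKeys4.map (fun k => (k, ([] : List String)))) = pvMk config [] := rfl
        rw [hinit, pvSetAdd hpa] at h
        cases hg : goA config fa (pvGetD (pvDGet config d) "pre") pr (pa ++ [d]) (pvMk config []) with
        | none => rw [hg] at h; cases h
        | some g =>
          obtain ⟨pats1, pr1, pa2⟩ := g
          rw [hg] at h
          dsimp only at h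
          obtain ⟨δa, cg, g1, g21, g22, gdisj, gcost, gsim⟩ := hgo _ _ _ _ _ hg
          dsimp only at g1 g21 g22 gdisj
          subst g21 g22
          have hda : d ∉ δa := fun hx => gdisj d hx (List.mem_append.2 (Or.inr (List.mem_singleton.2 rfl)))
          have hdpr1 : d ∉ pr ++ δa := by
            intro hx; rcases List.mem_append.1 hx with hx | hx
            · exact hpr hx
            · exact hda hx
          cases h
          refine ⟨δa ++ [d], cg + 2, ?_, ?_, ?_, ?_, ?_, ?_, ?_⟩
          · simp only [if_neg hpr]
            rw [g1]
            simpa using pvExtOwn config δa d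
          · simp only
            rw [pvSetAdd hdpr1, List.append_assoc]
          · simp only
            rw [pvEraseApp hpa]
          · intro hx; exact absurd hx hpr
          · intro x hx
            rcases List.mem_append.1 hx with hx | hx
            · intro hm; exact gdisj x hx (List.mem_append.2 (Or.inl hm))
            · rcases List.mem_singleton.1 hx with rfl; exact hpa
          · have hC := pvOneLeC (pvP config) fa
            have hlen : (pvGetD (pvDGet config d) "pre").length ≤ pvP config := pvPreLen_le config d
            have hcg : cg ≤ pvP config * (pvP config + 3) ^ fa :=
              le_trans gcost (Nat.mul_le_mul_right _ hlen)
            have h3 : 3 * 1 ≤ 3 * (pvP config + 3) ^ fa := Nat.mul_le_mul_left _ hC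
            calc cg + 2 + 1 ≤ pvP config * (pvP config + 3) ^ fa + 3 * (pvP config + 3) ^ fa := by omega
              _ = (pvP config + 3) ^ fa * (pvP config + 3) := by ring
              _ = (pvP config + 3) ^ (fa + 1) := (pow_succ _ _).symm
          · intro rest post k
            have e1 : cg + 2 + k = (cg + (1 + k)) + 1 := by omega
            rw [e1, loopB, if_neg hpr, if_neg hpa, pvSetAdd hpa]
            rw [gsim ((true, d) :: rest) post (1 + k)]
            have e2 : 1 + k = k + 1 := by omega
            rw [e2, loopB, pvSetAdd hdpr1, pvEraseApp hpa]
            rw [List.append_assoc, List.append_assoc]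

theorem pvLoopB_mono (config : List (String × List (String × List String))) :
    ∀ (f f' : Nat) s pr pa post r, loopB config f s pr pa post = some r → f ≤ f' →
      loopB config f' s pr pa post = some r := by
  intro f
  induction f with
  | zero =>
    intro f' s pr pa post r h hle
    cases s with
    | nil =>
      rw [loopB] at h
      cases f' with
      | zero => exact h
      | succ f'' => rw [loopB]; exact h
    | cons it rest => rw [loopB] at h; cases h
  | succ f ihf =>
    intro f' s pr pa post r h hle
    cases s with
    | nil =>
      rw [loopB] at h
      cases f' with
      | zero => exact h
      | succ f'' => rw [loopB]; exact h
    | cons it rest =>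
      obtain ⟨b, d⟩ := it
      cases f' with
      | zero => omega
      | succ f'' =>
        have hle' : f ≤ f'' := by omega
        cases b with
        | true =>
          rw [loopB] at h
          rw [loopB]
          exact ihf f'' _ _ _ _ _ h hle'
        | false =>
          rw [loopB] at h
          rw [loopB]
          by_cases hpr : d ∈ pr
          · rw [if_pos hpr] at h ⊢
            exact ihf f'' _ _ _ _ _ h hle'
          · rw [if_neg hpr] at h ⊢
            by_cases hpa : d ∈ pa
            · rw [if_pos hpa] at h; cases h
            · rw [if_neg hpa] at h ⊢
              exact ihf f'' _ _ _ _ _ h hle'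

-- ===== graph lemmas for the totality of A under Pre_ (reachability restricted to
-- dialects outside the initial processed set prc) =====

inductive pvChain (config : List (String × List (String × List String))) (prc : List String) : String → List String → String → Prop
  | single {a b : String} : b ∈ pvPre config a → pvChain config prc a [] b
  | cons {a x b : String} {l : List String} :
      x ∈ pvPre config a → x ∉ prc → pvChain config prc x l b → pvChain config prc a (x :: l) b

inductive pvTrace (config : List (String × List (String × List String))) (prc : List String) (root : String) : List String → String → Prop
  | nil : pvTrace config prc root [] root
  | snoc {tr : List String} {t d : String} :
      pvTrace config prc root tr t → t ∉ prc → d ∈ pvPre config t → pvTrace config prc root (tr ++ [t]) d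

theorem pvChain_snoc {config : List (String × List (String × List String))} {prc : List String} {a b c : String} {l : List String}
    (h : pvChain config prc a l b) (hb : b ∉ prc) (he : c ∈ pvPre config b) : pvChain config prc a (l ++ [b]) c := by
  induction h with
  | single hb0 => exact .cons hb0 hb (.single he)
  | cons hx hxp hc ih => exact .cons hx hxp (ih hb he)

theorem pvTrace_chain {config : List (String × List (String × List String))} {prc : List String} {root : String} {tr : List String} {d : String}
    (h : pvTrace config prc root tr d) : ∀ t ∈ tr, ∃ l, l.length ≤ tr.length ∧ pvChain config prc t l d := by
  induction h with
  | nil => intro t ht; simp at ht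
  | snoc htr htp he ih =>
    intro x hx
    rcases List.mem_append.1 hx with hx | hx
    · obtain ⟨l, hl, hch⟩ := ih x hx
      exact ⟨l ++ [_], by simp; omega, pvChain_snoc hch htp he⟩
    · rcases List.mem_singleton.1 hx with rfl
      exact ⟨[], by simp, .single he⟩

theorem pvStep_mono {config : List (String × List (String × List String))} {prc : List String} {s t : List String}
    (h : s ⊆ t) : pvStepR config prc s ⊆ pvStepR config prc t := by
  intro x hx
  rcases List.mem_append.1 hx with hx | hx
  · exact List.mem_append.2 (Or.inl (h hx))
  · obtain ⟨y, hy, hxy⟩ := List.mem_flatMap.1 hx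
    exact List.mem_append.2 (Or.inr (List.mem_flatMap.2 ⟨y, h hy, hxy⟩))

theorem pvStep_incl {config : List (String × List (String × List String))} {prc : List String} (s : List String) :
    s ⊆ pvStepR config prc s := fun _ hx => List.mem_append.2 (Or.inl hx)

theorem pvIter_mono {config : List (String × List (String × List String))} {prc : List String} {s t : List String}
    (h : s ⊆ t) : ∀ n, (pvStepR config prc)^[n] s ⊆ (pvStepR config prc)^[n] t := by
  intro n
  induction n generalizing s t with
  | zero => exact h
  | succ n ih =>
    rw [Function.iterate_succ_apply, Function.iterate_succ_apply]
    exact ih (pvStep_mono h)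

theorem pvIter_le {config : List (String × List (String × List String))} {prc : List String} {m n : Nat}
    (h : m ≤ n) (s : List String) : (pvStepR config prc)^[m] s ⊆ (pvStepR config prc)^[n] s := by
  induction n with
  | zero => have : m = 0 := by omega
            subst this; exact fun x hx => hx
  | succ n ih =>
    rcases Nat.lt_or_ge m (n+1) with hm | hm
    · intro x hx
      rw [Function.iterate_succ_apply']
      exact pvStep_incl _ (ih (by omega) hx)
    · have : m = n + 1 := by omega
      subst this; exact fun x hx => hx

theorem pvChain_reach {config : List (String × List (String × List String))} {prc : List String} {a b : String} {l : List String}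
    (h : pvChain config prc a l b) : b ∈ (pvStepR config prc)^[l.length] (pvPre config a) := by
  induction h with
  | single hb => exact hb
  | @cons a x b l hx hxp _ ih =>
    have hsub : pvPre config x ⊆ pvStepR config prc (pvPre config a) := by
      intro y hy
      refine List.mem_append.2 (Or.inr (List.mem_flatMap.2 ⟨x, hx, ?_⟩))
      rw [if_neg hxp]
      exact hy
    have := pvIter_mono hsub l.length ih
    simpa [Function.iterate_succ_apply] using this

theorem pvTrace_reach {config : List (String × List (String × List String))} {prc : List String} {root : String} {tr : List String} {d : String}
    (h : pvTrace config prc root tr d) : d ∈ (pvStepR config prc)^[tr.length] [root] := by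
  induction h with
  | nil => exact List.mem_singleton.2 rfl
  | @snoc tr t d htr htp he ih =>
    simp only [List.length_append, List.length_cons, List.length_nil]
    rw [Function.iterate_succ_apply']
    refine List.mem_append.2 (Or.inr (List.mem_flatMap.2 ⟨t, ih, ?_⟩))
    rw [if_neg htp]
    exact he

theorem pvIter_nil {config : List (String × List (String × List String))} {prc : List String} (n : Nat) :
    (pvStepR config prc)^[n] [] = [] := by
  induction n with
  | zero => rfl
  | succ n ih => rw [Function.iterate_succ_apply]; exact ih

theorem pvKeys_of_pre_ne {config : List (String × List (String × List String))} {d : String}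
    (h : pvPre config d ≠ []) : d ∈ config.map Prod.fst := by
  rcases pvPre_cases config d with h0 | ⟨v, hm, _⟩
  · exact absurd h0 h
  · have hk := PySem.Dict.mem_keys_of_mem_items _ hm
    have hkeys : (PySem.Dict.ofList config).keys = PySem.Set.ofList (config.map Prod.fst) :=
      PySem.Dict.keys_foldl_insert_key config Prod.fst (fun _ x => x.2) PySem.Dict.empty
    rw [hkeys] at hk
    exact (PySem.Set.mem_ofList _ _).1 hk

def pvKcount (config : List (String × List (String × List String))) (pa : List String) : Nat :=
  config.countP (fun p => decide (p.1 ∉ pa))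

theorem pvKcount_le (config : List (String × List (String × List String))) (pa : List String) :
    pvKcount config pa ≤ config.length := List.countP_le_length

theorem pvKcount_mono (config : List (String × List (String × List String))) (pa : List String) (d : String) :
    pvKcount config (pa ++ [d]) ≤ pvKcount config pa := by
  apply List.countP_mono_left
  intro p _ hp
  simp only [decide_eq_true_eq] at hp ⊢
  intro hmem; exact hp (List.mem_append.2 (Or.inl hmem))

theorem pvKcount_lt {config : List (String × List (String × List String))} {pa : List String} {d : String}
    (hmem : d ∈ config.map Prod.fst) (hpa : d ∉ pa) :
    pvKcount config (pa ++ [d]) < pvKcount config pa := by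
  induction config with
  | nil => simp at hmem
  | cons p cfg ih =>
    simp only [pvKcount, List.countP_cons] at *
    by_cases hd : p.1 = d
    · have h1 : (decide (p.1 ∉ pa ++ [d])) = false := by simp [hd]
      have h2 : (decide (p.1 ∉ pa)) = true := by simp [hd, hpa]
      rw [h1, h2]
      have := pvKcount_mono cfg pa d
      simp only [pvKcount] at this
      simp only [Bool.false_eq_true, if_false, if_true]
      omega
    · rcases List.mem_map.1 hmem with ⟨q, hq, hqd⟩
      rcases List.mem_cons.1 hq with rfl | hq'
      · exact absurd hqd hd
      · have hmem' : d ∈ cfg.map Prod.fst := List.mem_map.2 ⟨q, hq', hqd⟩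
        have heq : (decide (p.1 ∉ pa ++ [d])) = (decide (p.1 ∉ pa)) := by
          by_cases h : p.1 ∈ pa
          · simp [h]
          · simp [h, hd]
        rw [heq]
        have := ih hmem'
        omega

theorem pvTotalGo (config : List (String × List (String × List String)))
    (prc pa0 : List String) (root : String)
    (hpath : ∀ x ∈ pa0, x ∈ prc ∨ x ∉ pvReachR config prc root)
    (hacyc : ∀ p ∈ (PySem.Dict.ofList config).items, p.1 ∉ prc →
        p.1 ∈ pvReachR config prc root →
        p.1 ∉ (pvStepR config prc)^[config.length + 1] (pvGetD p.2 "pre")) :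
    ∀ (fa : Nat) (tr : List String) (d : String) (pr : List String),
      pvTrace config prc root tr d → (∀ x ∈ tr, x ∈ config.map Prod.fst) → tr.Nodup →
      (∀ x ∈ prc, x ∈ pr) →
      pvKcount config (pa0 ++ tr) < fa →
      (collectA config fa d pr (pa0 ++ tr)).isSome := by
  intro fa
  induction fa with
  | zero => intro tr d pr _ _ _ _ hk; omega
  | succ fa ih =>
    intro tr d pr htr hkeys hnd hsubpr hk
    rw [collectA]
    by_cases hpr : d ∈ pr
    · rw [if_pos hpr]; rfl
    · rw [if_neg hpr]
      have hdprc : d ∉ prc := fun h => hpr (hsubpr d h)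
      -- d is not on the path: d ∈ pa0 contradicts hpath (via the trace's last edge),
      -- d ∈ tr would close a 'pre' cycle, contradicting hacyc
      have htrlen : tr.length ≤ config.length := by
            have h1 : tr.length = tr.toFinset.card := (List.toFinset_card_of_nodup hnd).symm
            have h2 : tr.toFinset ⊆ (config.map Prod.fst).toFinset := by
              intro x hxx
              exact List.mem_toFinset.2 (hkeys x (List.mem_toFinset.1 hxx))
            have h3 : tr.toFinset.card ≤ (config.map Prod.fst).toFinset.card :=
              Finset.card_le_card h2
            have h4 : (config.map Prod.fst).toFinset.card ≤ (config.map Prod.fst).length :=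
              List.toFinset_card_le _
            simp only [List.length_map] at h4
            omega
      have hdR : d ∈ pvReachR config prc root :=
        pvIter_le (by omega) _ (pvTrace_reach htr)
      have hdpa : d ∉ pa0 ++ tr := by
        intro habs
        rcases List.mem_append.1 habs with hx | hx
        · rcases hpath d hx with h | h
          · exact hdprc h
          · exact h hdR
        · obtain ⟨l, hlen, hch⟩ := pvTrace_chain htr d hx
          have hreach := pvChain_reach hch
          have hreach' : d ∈ (pvStepR config prc)^[config.length + 1] (pvPre config d) :=
            pvIter_le (by omega) _ hreach
          rcases pvPre_cases config d with h0 | ⟨v, hm, he⟩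
          · rw [h0, pvIter_nil] at hreach'
            simp at hreach'
          · rw [he] at hreach'
            exact hacyc (d, v) hm hdprc hdR hreach'
      rw [if_neg hdpa, pvSetAdd hdpa]
      have hgo : ∀ (deps : List String), (∀ x ∈ deps, x ∈ pvPre config d) →
          ∀ (pr' : List String), (∀ x ∈ prc, x ∈ pr') → ∀ pats,
          (goA config fa deps pr' ((pa0 ++ tr) ++ [d]) pats).isSome := by
        intro deps
        induction deps with
        | nil => intro _ pr' _ pats; rw [goA]; rfl
        | cons x deps ihd =>
          intro hsub pr' hsubpr' pats
          rw [goA]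
          have hxpre : x ∈ pvPre config d := hsub x (List.mem_cons_self)
          have hpre_ne : pvPre config d ≠ [] := fun h0 => by rw [h0] at hxpre; simp at hxpre
          have hdkey : d ∈ config.map Prod.fst := pvKeys_of_pre_ne hpre_ne
          have hdtr : d ∉ tr := fun hm => hdpa (List.mem_append.2 (Or.inr hm))
          have hrec : (collectA config fa x pr' (pa0 ++ (tr ++ [d]))).isSome := by
            apply ih (tr ++ [d]) x pr'
            · exact pvTrace.snoc htr hdprc hxpre
            · intro y hy
              rcases List.mem_append.1 hy with hy | hy
              · exact hkeys y hy
              · rcases List.mem_singleton.1 hy with rfl; exact hdkey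
            · rw [List.nodup_append]
              refine ⟨hnd, List.nodup_singleton d, ?_⟩
              intro a ha b hb
              rcases List.mem_singleton.1 hb with rfl
              exact fun h => hdtr (h ▸ ha)
            · exact hsubpr'
            · have hlt : pvKcount config ((pa0 ++ tr) ++ [d]) < pvKcount config (pa0 ++ tr) :=
                pvKcount_lt hdkey hdpa
              rw [List.append_assoc] at hlt
              omega
          rw [← List.append_assoc] at hrec
          cases hcx : collectA config fa x pr' ((pa0 ++ tr) ++ [d]) with
          | none => rw [hcx] at hrec; cases hrec
          | some trip =>
            obtain ⟨prePat, pr1, pa1⟩ := trip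
            obtain ⟨δ1, c1, g1, g21, g22, _, _, _, _⟩ := pvMainA config fa x pr' _ _ hcx
            dsimp only at g21 g22
            subst g21 g22
            exact ihd (fun y hy => hsub y (List.mem_cons_of_mem _ hy)) (pr' ++ δ1)
              (fun y hy => List.mem_append.2 (Or.inl (hsubpr' y hy))) _
      have hsome := hgo (pvGetD (pvDGet config d) "pre") (fun x hx => hx) pr hsubpr
        (pvKeys4.map (fun k => (k, ([] : List String))))
      obtain ⟨g, hgg⟩ := Option.isSome_iff_exists.1 hsome
      rw [hgg]
      obtain ⟨a, b2, c3⟩ := g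
      rfl

theorem pvTotalA (config : List (String × List (String × List String)))
    (prc pa0 : List String) (root : String)
    (hpath : ∀ x ∈ pa0, x ∈ prc ∨ x ∉ pvReachR config prc root)
    (hacyc : ∀ p ∈ (PySem.Dict.ofList config).items, p.1 ∉ prc →
        p.1 ∈ pvReachR config prc root →
        p.1 ∉ (pvStepR config prc)^[config.length + 1] (pvGetD p.2 "pre")) :
    (collectA config (config.length + 2) root prc pa0).isSome := by
  have := pvTotalGo config prc pa0 root hpath hacyc (config.length + 2) [] root prc
    pvTrace.nil (by simp) List.nodup_nil (fun x hx => hx)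
    (by have := pvKcount_le config (pa0 ++ []); omega)
  simpa using this


-- ===== VERDICT (by name: the statement is the Claim_ definition above) =====
theorem collect_patterns_spec : Claim_equal_collect_patterns := by
  intro config dialect processed path _ hpre
  unfold Spec_collect_patterns collect_patterns collect_patterns_alt
  rcases hpre with hproc | ⟨hpath, hacyc⟩
  · rw [collectA, if_pos hproc]
    simp only [if_pos hproc]
  · have htot := pvTotalA config (processed.getD []) (path.getD []) dialect hpath hacyc
    cases hout : collectA config (config.length + 2) dialect (processed.getD []) (path.getD []) with
    | none => rw [hout] at htot; cases htot
    | some out =>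
      obtain ⟨pats, pr', pa'⟩ := out
      obtain ⟨δ, c, h1, h21, h22, hskip, hdisj, hcost, hsim⟩ :=
        pvMainA config _ _ _ _ _ hout
      dsimp only at h1 h21 h22
      by_cases hpr : dialect ∈ processed.getD []
      · rw [if_pos hpr] at h1
        simp only [if_pos hpr]
        exact h1
      · rw [if_neg hpr] at h1
        simp only [if_neg hpr]
        have hrun : loopB config (c + 1) [(false, dialect)] (processed.getD []) (path.getD []) []
            = some ([] ++ δ, (processed.getD []) ++ δ) := by
          rw [hsim [] [] 1, loopB]
        have hfuel : c + 1 ≤ pvFuelB config := hcost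
        have hbig := pvLoopB_mono config (c + 1) (pvFuelB config) _ _ _ _ _ hrun hfuel
        rw [hbig]
        simpa using h1
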